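-- pv_equiv track=rewrite | github.com/medthehatta/meve | sheets.py | columns_to_records
-- ===== SOURCE A (Python) =====
-- def columns_to_records(columns):
--     if not columns:
--         return []
--
--     header = list(columns.keys())
--     len_first = len(columns[header[0]])
--     if any(len(col) != len_first for col in columns.values()):
--         raise ValueError(f"Ragged columns: {columns}")
--
--     return [
--         dict(zip(header, record))
--         for record in zip(*[columns[field] for field in header])
--     ]
-- ===== SOURCE B (Python) =====
-- def columns_to_records(columns):
--     if not columns:
--         return []
--
--     header = list(columns.keys())
--     len_first = len(columns[header[0]])
--     if any(len(col) != len_first for col in columns.values()):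
--         raise ValueError(f"Ragged columns: {columns}")
--
--     records = [dict() for _ in range(len_first)]
--     for field, col in columns.items():
--         for i, val in enumerate(col):
--             records[i][field] = val
--     return records
-- ===== Notes on version B (the rewrite author's own statement) =====
-- stated objective: alternative
-- what changed: Replaces the row-major zip-transpose (zip(*cols) then dict(zip(header, row)) per row) with a column-major fill of preallocated row dicts (records[i][field] = val while scanning each column once).
import Mathlib
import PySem

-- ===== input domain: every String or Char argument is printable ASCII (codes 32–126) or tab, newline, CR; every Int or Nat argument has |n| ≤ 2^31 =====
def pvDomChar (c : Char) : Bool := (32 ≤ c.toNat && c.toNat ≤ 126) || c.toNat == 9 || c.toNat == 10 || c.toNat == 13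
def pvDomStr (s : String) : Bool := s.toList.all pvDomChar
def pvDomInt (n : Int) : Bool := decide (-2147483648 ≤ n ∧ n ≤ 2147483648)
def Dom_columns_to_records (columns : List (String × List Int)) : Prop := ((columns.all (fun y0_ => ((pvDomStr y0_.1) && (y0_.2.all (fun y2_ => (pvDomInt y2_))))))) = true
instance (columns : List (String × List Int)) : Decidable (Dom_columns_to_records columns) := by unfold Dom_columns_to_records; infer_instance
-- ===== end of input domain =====

-- B replaces A's row-major zip-transpose with a column-major fill of preallocated row records (alternative decomposition, same cost); equivalence is about the return value.

-- ===== PORT A =====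
-- python dict assignment d[k] = v on an association list: overwrite in place, else append (exact)
def dinsert (d : List (String × Int)) (k : String) (v : Int) : List (String × Int) :=
  if d.any (fun p => p.1 == k) then d.map (fun p => if p.1 == k then (k, v) else p)
  else d ++ [(k, v)]

-- python dict lookup columns[field] (first match; total here, Pre_ keys come from the dict itself)
def dget (columns : List (String × List Int)) (f : String) : List Int :=
  ((columns.find? (fun p => p.1 == f)).map Prod.snd).getD []

-- dict(pairs): build a dict from a pair list by repeated assignment (exact)
def dictOfPairs (pairs : List (String × Int)) : List (String × Int) :=
  pairs.foldl (fun d p => dinsert d p.1 p.2) []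

-- zip(*ls): rows while every list is nonempty, taking the heads (exact)
def pyZipN (ls : List (List Int)) : List (List Int) :=
  if h : ls = [] ∨ ls.any (·.isEmpty) then []
  else (ls.map (fun l => l.headD 0)) :: pyZipN (ls.map List.tail)
termination_by (ls.headD []).length
decreasing_by
  rw [not_or] at h
  obtain ⟨hne, hall⟩ := h
  cases ls with
  | nil => exact absurd rfl hne
  | cons a rest =>
    simp only [List.map_cons, List.headD_cons]
    cases a with
    | nil => exact absurd (by simp) hall
    | cons x xs => simp

def columns_to_records (columns : List (String × List Int)) : List (List (String × Int)) :=
  if columns.isEmpty then []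
  else
    let header := columns.map Prod.fst
    -- len_first / the ragged-columns check raise ValueError on ragged input; those inputs are excluded by Pre_
    let rows := pyZipN (header.map (fun f => dget columns f))
    rows.map (fun record => dictOfPairs (header.zip record))

-- ===== PORT B =====
-- python dict assignment records[i][field] = val (overwrite in place, else append) — B's own copy (exact)
def recAssign (d : List (String × Int)) (k : String) (v : Int) : List (String × Int) :=
  if d.any (fun p => p.1 == k) then d.map (fun p => if p.1 == k then (k, v) else p)
  else d ++ [(k, v)]

def columns_to_records_alt (columns : List (String × List Int)) : List (List (String × Int)) :=
  if columns.isEmpty then []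
  else
    let lenFirst := ((columns.headD ("", [])).2).length
    columns.foldl
      (fun records p => List.zipWith (fun r v => recAssign r p.1 v) records p.2)
      (List.replicate lenFirst ([] : List (String × Int)))

-- ===== PRECONDITION & SPEC =====
-- Pre_ excludes (a) ragged columns, on which A raises ValueError, and (b) association lists with
-- duplicate keys, which cannot arise from a Python dict argument (the dict invariant).
def Pre_columns_to_records (columns : List (String × List Int)) : Prop :=
  (∀ p ∈ columns, p.2.length = ((columns.headD ("", [])).2).length) ∧
  (columns.map Prod.fst).Nodup
instance (columns : List (String × List Int)) : Decidable (Pre_columns_to_records columns) := by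
  unfold Pre_columns_to_records; infer_instance

def pvWitness_columns_to_records : (List (String × List Int)) := [("a", [1, 2]), ("b", [3, 4])]

def Spec_columns_to_records (columns : List (String × List Int)) (out : List (List (String × Int))) : Prop := out = columns_to_records_alt columns
instance (columns : List (String × List Int)) (out : List (List (String × Int))) : Decidable (Spec_columns_to_records columns out) := by unfold Spec_columns_to_records; infer_instance

-- ===== CLAIM (what is proved, stated in full; the proofs are below) =====
def Claim_equal_columns_to_records : Prop := ∀ (columns : List (String × List Int)), Dom_columns_to_records columns → Pre_columns_to_records columns → Spec_columns_to_records columns (columns_to_records columns)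

-- ===== LEMMAS AND PROOFS =====

-- the common closed form: row i of the result
def rowAt (columns : List (String × List Int)) (i : Nat) : List (String × Int) :=
  columns.map (fun p => (p.1, p.2.getD i 0))

theorem dinsert_fresh (d : List (String × Int)) (k : String) (v : Int)
    (h : d.any (fun p => p.1 == k) = false) : dinsert d k v = d ++ [(k, v)] := by
  simp [dinsert, h]

theorem recAssign_fresh (d : List (String × Int)) (k : String) (v : Int)
    (h : d.any (fun p => p.1 == k) = false) : recAssign d k v = d ++ [(k, v)] := by
  simp [recAssign, h]

theorem pyZipN_closed (n : Nat) : ∀ (ls : List (List Int)), ls ≠ [] →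
    (∀ l ∈ ls, l.length = n) →
    pyZipN ls = (List.range n).map (fun i => ls.map (fun l => l.getD i 0)) := by
  induction n with
  | zero =>
    intro ls hne hlen
    rw [pyZipN]
    have : ls.any (·.isEmpty) = true := by
      cases ls with
      | nil => exact absurd rfl hne
      | cons a rest =>
        have := hlen a (by simp)
        simp [List.any_cons, List.isEmpty_iff, List.length_eq_zero_iff.mp this]
    simp [this]
  | succ m ih =>
    intro ls hne hlen
    rw [pyZipN]
    have hnotany : ls.any (·.isEmpty) = false := by
      rw [List.any_eq_false]
      intro l hl
      have := hlen l hl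
      simp [List.isEmpty_iff]
      intro h0; rw [h0] at this; simp at this
    have hcond : ¬ (ls = [] ∨ ls.any (·.isEmpty)) := by
      push_neg; exact ⟨hne, by simp [hnotany]⟩
    rw [dif_neg hcond]
    have htail : ∀ l ∈ ls.map List.tail, l.length = m := by
      intro l hl
      obtain ⟨l', hl', rfl⟩ := List.mem_map.mp hl
      have := hlen l' hl'
      simp [List.length_tail, this]
    have htne : ls.map List.tail ≠ [] := by
      cases ls with
      | nil => exact absurd rfl hne
      | cons a rest => simp
    rw [ih (ls.map List.tail) htne htail]
    rw [List.range_succ_eq_map]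
    simp only [List.map_cons, List.map_map]
    congr 1
    · apply List.map_congr_left
      intro l hl
      have hlne : l ≠ [] := by
        have := hlen l hl; intro h0; rw [h0] at this; simp at this
      cases l with
      | nil => exact absurd rfl hlne
      | cons x xs => simp [List.getD]
    · apply List.map_congr_left
      intro i _
      simp only [Function.comp]
      apply List.map_congr_left
      intro l hl
      have hlne : l ≠ [] := by
        have := hlen l hl; intro h0; rw [h0] at this; simp at this
      cases l with
      | nil => exact absurd rfl hlne
      | cons x xs => simp [List.getD]

theorem dget_self (columns : List (String × List Int))
    (hnd : (columns.map Prod.fst).Nodup) :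
    ∀ p ∈ columns, dget columns p.1 = p.2 := by
  induction columns with
  | nil => intro p hp; simp at hp
  | cons q rest ih =>
    intro p hp
    simp only [List.map_cons, List.nodup_cons] at hnd
    rcases List.mem_cons.mp hp with rfl | hmem
    · simp [dget]
    · have hne : q.1 ≠ p.1 := by
        intro h; exact hnd.1 (h ▸ List.mem_map_of_mem hmem)
      have : dget (q :: rest) p.1 = dget rest p.1 := by
        simp [dget, List.find?_cons, hne]
      rw [this]
      exact ih hnd.2 p hmem

theorem foldl_dinsert_fresh : ∀ (pairs acc : List (String × Int)),
    (pairs.map Prod.fst).Nodup →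
    (∀ p ∈ pairs, acc.any (fun q => q.1 == p.1) = false) →
    pairs.foldl (fun d p => dinsert d p.1 p.2) acc = acc ++ pairs := by
  intro pairs
  induction pairs with
  | nil => intro acc _ _; simp
  | cons p rest ih =>
    intro acc hnd hfresh
    simp only [List.map_cons, List.nodup_cons] at hnd
    simp only [List.foldl_cons]
    rw [dinsert_fresh acc p.1 p.2 (hfresh p (by simp))]
    rw [ih (acc ++ [(p.1, p.2)]) hnd.2 ?_]
    · simp
    · intro q hq
      rw [List.any_append]
      have h1 : acc.any (fun r => r.1 == q.1) = false := hfresh q (List.mem_cons_of_mem _ hq)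
      have h2 : p.1 ≠ q.1 := by
        intro h; exact hnd.1 (h ▸ List.mem_map_of_mem hq)
      simp [h1, h2]

theorem dictOfPairs_nodup (pairs : List (String × Int))
    (hnd : (pairs.map Prod.fst).Nodup) : dictOfPairs pairs = pairs := by
  unfold dictOfPairs
  rw [foldl_dinsert_fresh pairs [] hnd (by intro p _; simp)]
  simp

theorem zipWith_map_range {α : Type} (n : Nat) (g : Nat → α) (c : List Int)
    (hc : c.length = n) (h : α → Int → α) :
    List.zipWith h ((List.range n).map g) c = (List.range n).map (fun i => h (g i) (c.getD i 0)) := by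
  apply List.ext_getElem
  · simp [hc]
  · intro i h1 h2
    simp only [List.length_zipWith, List.length_map, List.length_range, hc, Nat.min_self] at h1
    have hic : i < c.length := by omega
    simp [List.getElem_zipWith, List.getD, List.getElem?_eq_getElem hic]

theorem fold_fill_closed : ∀ (columns : List (String × List Int)) (n : Nat)
    (g : Nat → List (String × Int)),
    (∀ p ∈ columns, p.2.length = n) →
    (columns.map Prod.fst).Nodup →
    (∀ p ∈ columns, ∀ i, (g i).any (fun q => q.1 == p.1) = false) →
    columns.foldl (fun records p => List.zipWith (fun r v => recAssign r p.1 v) records p.2)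
        ((List.range n).map g)
      = (List.range n).map (fun i => g i ++ rowAt columns i) := by
  intro columns
  induction columns with
  | nil => intro n g _ _ _; simp [rowAt]
  | cons p rest ih =>
    intro n g hlen hnd hfresh
    simp only [List.map_cons, List.nodup_cons] at hnd
    simp only [List.foldl_cons]
    rw [zipWith_map_range n g p.2 (hlen p (by simp)) (fun r v => recAssign r p.1 v)]
    have hstep : (fun i => recAssign (g i) p.1 (p.2.getD i 0))
        = fun i => g i ++ [(p.1, p.2.getD i 0)] := by
      funext i
      exact recAssign_fresh _ _ _ (hfresh p (by simp) i)
    rw [hstep]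
    rw [ih n (fun i => g i ++ [(p.1, p.2.getD i 0)])
        (fun q hq => hlen q (List.mem_cons_of_mem _ hq)) hnd.2 ?_]
    · apply List.map_congr_left
      intro i _
      simp [rowAt]
    · intro q hq i
      rw [List.any_append]
      have h1 := hfresh q (List.mem_cons_of_mem _ hq) i
      have h2 : p.1 ≠ q.1 := by
        intro h; exact hnd.1 (h ▸ List.mem_map_of_mem hq)
      simp [h1, h2]

-- ===== VERDICT (by name: the statement is the Claim_ definition above) =====
theorem columns_to_records_spec : Claim_equal_columns_to_records := by
  intro columns _ hpre
  obtain ⟨hlen, hnd⟩ := hpre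
  unfold Spec_columns_to_records columns_to_records columns_to_records_alt
  cases columns with
  | nil => simp
  | cons p0 rest =>
    simp only [List.isEmpty_cons, if_neg (by simp : ¬ (false = true))]
    set columns := p0 :: rest with hcols
    set n := ((columns.headD ("", [])).2).length with hn
    -- A side
    have hdget : columns.map (fun q => dget columns q.1) = columns.map Prod.snd := by
      apply List.map_congr_left
      intro q hq
      exact dget_self columns hnd q hq
    have hmapmap : (columns.map Prod.fst).map (fun f => dget columns f)
        = columns.map (fun q => dget columns q.1) := by
      rw [List.map_map]; rfl
    have hlsne : columns.map Prod.snd ≠ [] := by simp [hcols]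
    have hlslen : ∀ l ∈ columns.map Prod.snd, l.length = n := by
      intro l hl
      obtain ⟨q, hq, rfl⟩ := List.mem_map.mp hl
      exact hlen q hq
    have hA : pyZipN ((columns.map Prod.fst).map (fun f => dget columns f))
        = (List.range n).map (fun i => (columns.map Prod.snd).map (fun l => l.getD i 0)) := by
      rw [hmapmap, hdget]
      exact pyZipN_closed n (columns.map Prod.snd) hlsne hlslen
    rw [hA, List.map_map]
    have hArow : ((fun record => dictOfPairs ((columns.map Prod.fst).zip record)) ∘
        fun i => (columns.map Prod.snd).map fun l => l.getD i 0)
        = fun i => rowAt columns i := by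
      funext i
      simp only [Function.comp, List.map_map]
      rw [List.zip_map']
      rw [show (columns.map fun x => (x.1, ((fun l => l.getD i 0) ∘ Prod.snd) x)) = rowAt columns i from rfl]
      apply dictOfPairs_nodup
      have : (rowAt columns i).map Prod.fst = columns.map Prod.fst := by
        simp [rowAt, List.map_map]
      rw [this]; exact hnd
    rw [hArow]
    -- B side
    have hrepl : List.replicate n ([] : List (String × Int))
        = (List.range n).map (fun _ => []) := by
      rw [List.map_const']
      simp
    rw [hrepl, fold_fill_closed columns n (fun _ => []) hlen hnd (by intro q _ i; simp)]
    simp
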